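-- pv_equiv track=rewrite | github.com/GusBusDraws/advent-of-code-2023 | puzzle-02.py | process_found_digits
-- ===== SOURCE A (Python) =====
-- def process_found_digits(found_digits_by_idx : dict):
--     found_digits_by_idx = dict(sorted(found_digits_by_idx.items()))
--     digits = [str(digit) for digit in found_digits_by_idx.values()]
--     val = ''.join(digits)
--     if len(val) == 1:
--         val += val
--     elif len(val) > 2:
--         val = val[0] + val[-1]
--     return int(val)
-- ===== SOURCE B (Python) =====
-- def process_found_digits(found_digits_by_idx : dict):
--     firstv = found_digits_by_idx[min(found_digits_by_idx)]
--     lastv = found_digits_by_idx[max(found_digits_by_idx)]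
--     return int(str(firstv)[0] + str(lastv)[-1])
-- ===== Notes on version B (the rewrite author's own statement) =====
-- stated objective: simpler
-- what changed: Instead of sorting all items, joining every value's digits and slicing the joined string, B looks up only the entries at the minimal and maximal key and combines the first character of the earliest value with the last character of the latest value.
import Mathlib
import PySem

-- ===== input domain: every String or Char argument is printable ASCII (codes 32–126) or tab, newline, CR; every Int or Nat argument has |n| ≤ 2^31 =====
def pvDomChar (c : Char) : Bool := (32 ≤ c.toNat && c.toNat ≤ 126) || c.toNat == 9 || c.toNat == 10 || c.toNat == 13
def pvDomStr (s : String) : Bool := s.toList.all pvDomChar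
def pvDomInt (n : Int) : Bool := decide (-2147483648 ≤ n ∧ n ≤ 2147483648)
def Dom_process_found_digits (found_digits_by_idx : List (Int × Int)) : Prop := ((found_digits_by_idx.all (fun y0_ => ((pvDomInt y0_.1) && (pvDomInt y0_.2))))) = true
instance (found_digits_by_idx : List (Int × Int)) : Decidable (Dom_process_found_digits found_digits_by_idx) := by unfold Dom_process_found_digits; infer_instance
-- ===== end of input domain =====

-- B replaces A's sort+join+slice over all entries by looking up only the entries at the
-- minimal and maximal key (objective: simpler).  Shared decode helper pvAsDict: the
-- assoc-list argument stands for the Python dict both functions receive (first binding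
-- per key wins).
def pvAsDict : List (Int × Int) → List (Int × Int)
  | [] => []
  | (k, v) :: t => (k, v) :: pvAsDict (t.filter (fun p => !(p.1 == k)))
  termination_by l => l.length
  decreasing_by simp; exact le_trans (List.length_filter_le _ _) (by simp)

-- ===== PORT A =====
def process_found_digits (found_digits_by_idx : List (Int × Int)) : Int :=
  let d := pvAsDict found_digits_by_idx
  let items := PySem.List.sorted2 d (fun p => p.1) (fun p => p.2)
  let digits := items.map (fun digit => PySem.Int.toChars digit.2)
  let val := PySem.Chars.join [] digits
  let val' := if val.length == 1 then val ++ val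
    else if 2 < val.length then [PySem.List.pyGetD val 0 ' ', PySem.List.pyGetD val (-1) ' ']
    else val
  (PySem.Int.ofChars? val').getD 0  -- int('') (empty dict) raises ValueError: excluded by Pre_

-- ===== PORT B =====
def process_found_digits_alt (found_digits_by_idx : List (Int × Int)) : Int :=
  let d := pvAsDict found_digits_by_idx
  let keys := d.map (fun p => p.1)
  match PySem.List.min? keys (fun k => k), PySem.List.max? keys (fun k => k) with
  | some mk, some xk =>
    let firstv := ((d.find? (fun p => p.1 == mk)).map (fun p => p.2)).getD 0
    let lastv := ((d.find? (fun p => p.1 == xk)).map (fun p => p.2)).getD 0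
    (PySem.Int.ofChars? [PySem.List.pyGetD (PySem.Int.toChars firstv) 0 ' ',
                         PySem.List.pyGetD (PySem.Int.toChars lastv) (-1) ' ']).getD 0
  | _, _ => 0  -- min()/max() of an empty dict raises ValueError: excluded by Pre_

-- ===== PRECONDITION & SPEC =====
-- Pre_ excludes only the empty dict, on which BOTH programs raise ValueError.
def Pre_process_found_digits (found_digits_by_idx : List (Int × Int)) : Prop :=
  found_digits_by_idx ≠ []
instance (found_digits_by_idx : List (Int × Int)) : Decidable (Pre_process_found_digits found_digits_by_idx) := by unfold Pre_process_found_digits; infer_instance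
def pvWitness_process_found_digits : (List (Int × Int)) := ([(1, 2)])
def Spec_process_found_digits (found_digits_by_idx : List (Int × Int)) (out : Int) : Prop := out = process_found_digits_alt found_digits_by_idx
instance (found_digits_by_idx : List (Int × Int)) (out : Int) : Decidable (Spec_process_found_digits found_digits_by_idx out) := by unfold Spec_process_found_digits; infer_instance

-- ===== CLAIM (what is proved, stated in full; the proofs are below) =====
def Claim_equal_process_found_digits : Prop := ∀ (found_digits_by_idx : List (Int × Int)), Dom_process_found_digits found_digits_by_idx → Pre_process_found_digits found_digits_by_idx → Spec_process_found_digits found_digits_by_idx (process_found_digits found_digits_by_idx)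

-- ===== LEMMAS AND PROOFS =====

theorem pv_toDigitsCore_len (b : Nat) : ∀ f n (acc : List Char), acc.length < (Nat.toDigitsCore b (f+1) n acc).length := by
  intro f
  induction f with
  | zero => intro n acc; simp [Nat.toDigitsCore]
  | succ f ih =>
    intro n acc
    rw [Nat.toDigitsCore]
    split
    · simp
    · exact Nat.lt_trans (by simp) (ih _ _)

theorem pv_toChars_ne_nil (n : Int) : PySem.Int.toChars n ≠ [] := by
  unfold PySem.Int.toChars
  split
  · simp
  · have := pv_toDigitsCore_len 10 n.toNat n.toNat []
    unfold Nat.toDigits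
    intro h; rw [h] at this; simp at this

theorem pv_asDict_sub_aux : ∀ (n : Nat) (l : List (Int × Int)), l.length ≤ n → ∀ p ∈ pvAsDict l, p ∈ l := by
  intro n
  induction n with
  | zero =>
    intro l hl
    rw [List.length_eq_zero_iff.mp (Nat.le_zero.mp hl)]
    simp [pvAsDict]
  | succ n ih =>
    intro l hl p hp
    match l with
    | [] => simpa [pvAsDict] using hp
    | (k, v) :: t =>
      rw [pvAsDict] at hp
      rcases List.mem_cons.mp hp with h | h
      · simp [h]
      · have hlen : (t.filter (fun p => !(p.1 == k))).length ≤ n := by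
          have := List.length_filter_le (fun p => !(p.1 == k)) t
          simp at hl; omega
        have := ih _ hlen p h
        have := List.mem_of_mem_filter this
        simp [this]

theorem pv_asDict_sub (l : List (Int × Int)) : ∀ p ∈ pvAsDict l, p ∈ l :=
  pv_asDict_sub_aux l.length l le_rfl

theorem pv_asDict_keys_nodup_aux : ∀ (n : Nat) (l : List (Int × Int)), l.length ≤ n → ((pvAsDict l).map (fun p => p.1)).Nodup := by
  intro n
  induction n with
  | zero =>
    intro l hl
    rw [List.length_eq_zero_iff.mp (Nat.le_zero.mp hl)]
    simp [pvAsDict]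
  | succ n ih =>
    intro l hl
    match l with
    | [] => simp [pvAsDict]
    | (k, v) :: t =>
      rw [pvAsDict]
      simp only [List.map_cons, List.nodup_cons]
      have hlen : (t.filter (fun p => !(p.1 == k))).length ≤ n := by
        have := List.length_filter_le (fun p => !(p.1 == k)) t
        simp at hl; omega
      refine ⟨?_, ih _ hlen⟩
      intro hmem
      simp only [List.mem_map] at hmem
      obtain ⟨p, hp, hk⟩ := hmem
      have := pv_asDict_sub _ p hp
      have := List.of_mem_filter this
      simp [hk] at this

theorem pv_asDict_keys_nodup (l : List (Int × Int)) : ((pvAsDict l).map (fun p => p.1)).Nodup :=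
  pv_asDict_keys_nodup_aux l.length l le_rfl

theorem pv_asDict_ne_nil {l : List (Int × Int)} (h : l ≠ []) : pvAsDict l ≠ [] := by
  match l with
  | [] => exact absurd rfl h
  | (k, v) :: t => rw [pvAsDict]; simp

theorem pv_find_nodup {d : List (Int × Int)} {k v : Int}
    (hnd : (d.map (fun p => p.1)).Nodup) (hmem : (k, v) ∈ d) :
    d.find? (fun p => p.1 == k) = some (k, v) := by
  induction d with
  | nil => simp at hmem
  | cons a t ih =>
    simp only [List.map_cons, List.nodup_cons] at hnd
    rcases List.mem_cons.mp hmem with h | h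
    · subst h; simp [List.find?]
    · have hne : ¬ (a.1 == k) = true := by
        simp only [beq_iff_eq]
        intro he
        exact hnd.1 (List.mem_map.mpr ⟨(k, v), h, he ▸ rfl⟩)
      rw [List.find?_cons]
      simp only [hne]
      exact ih hnd.2 h

theorem pv_reshape (val : List Char) (h : val ≠ []) :
    (if val.length == 1 then val ++ val
     else if 2 < val.length then [PySem.List.pyGetD val 0 ' ', PySem.List.pyGetD val (-1) ' ']
     else val) = [val.head h, val.getLast h] := by
  match val with
  | [a] => simp
  | [a, b] => simp
  | a :: b :: c :: t =>
    have hlen : 2 < (a :: b :: c :: t).length := by simp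
    rw [if_neg (by simp), if_pos hlen, PySem.List.pyGetD_zero_cons,
      PySem.List.pyGetD_neg_one (h := h)]
    simp

theorem pv_insertBy_congr {α : Type} (b1 b2 : α → α → Bool) (x : α) (ys : List α)
    (h : ∀ y ∈ ys, b1 x y = b2 x y) :
    PySem.List.insertBy b1 x ys = PySem.List.insertBy b2 x ys := by
  induction ys with
  | nil => rfl
  | cons y ys ih =>
    rw [PySem.List.insertBy, PySem.List.insertBy, h y (by simp)]
    split
    · rfl
    · rw [ih (fun z hz => h z (by simp [hz]))]

theorem pv_foldl_insertBy_congr {α : Type} (b1 b2 : α → α → Bool) (S : List α)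
    (hS : ∀ a ∈ S, ∀ b ∈ S, b1 a b = b2 a b) :
    ∀ (l acc : List α), (∀ x ∈ l, x ∈ S) → (∀ x ∈ acc, x ∈ S) →
    l.foldl (fun acc x => PySem.List.insertBy b1 x acc) acc
      = l.foldl (fun acc x => PySem.List.insertBy b2 x acc) acc := by
  intro l
  induction l with
  | nil => intro acc _ _; rfl
  | cons x t ih =>
    intro acc hl hacc
    simp only [List.foldl_cons]
    have hx : x ∈ S := hl x (by simp)
    rw [pv_insertBy_congr b1 b2 x acc (fun y hy => hS x hx y (hacc y hy))]
    exact ih _ (fun z hz => hl z (by simp [hz]))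
      (fun z hz => by
        rcases (PySem.List.mem_insertBy _ _ _ _).mp hz with h | h
        · exact h ▸ hx
        · exact hacc z h)

theorem pv_sorted2_eq_sorted (d : List (Int × Int))
    (hinj : ∀ a ∈ d, ∀ b ∈ d, a.1 = b.1 → a = b) :
    PySem.List.sorted2 d (fun p => p.1) (fun p => p.2) = PySem.List.sorted d (fun p => p.1) := by
  unfold PySem.List.sorted2 PySem.List.sorted
  simp only [Bool.false_eq_true, if_false]
  apply pv_foldl_insertBy_congr _ _ d _ d [] (fun x hx => hx) (by simp)
  intro a ha b hb
  by_cases hk : a.1 = b.1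
  · have hab : a = b := hinj a ha b hb hk
    subst hab
    simp
  · rcases lt_or_gt_of_ne hk with h | h
    · simp [h]
    · simp [h, not_lt_of_gt h ]

theorem pv_join_nil_cons (a : List Char) (t : List (List Char)) :
    PySem.Chars.join [] (a :: t) = a ++ PySem.Chars.join [] t := by
  cases t with
  | nil => simp [PySem.Chars.join, List.intercalate, List.intersperse]
  | cons b t' => simp [PySem.Chars.join, List.intercalate, List.intersperse]

theorem pv_join_nil (L : List (List Char)) : PySem.Chars.join [] L = L.flatten := by
  induction L with
  | nil => rfl
  | cons a t ih => rw [pv_join_nil_cons, ih, List.flatten_cons]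

theorem pv_pairwise_getLast {α : Type} (r : α → α → Prop) (hr : ∀ a, r a a) :
    ∀ (l : List α) (hne : l ≠ []), l.Pairwise r → ∀ y ∈ l, r y (l.getLast hne) := by
  intro l
  induction l with
  | nil => intro h; exact absurd rfl h
  | cons a t ih =>
    intro hne hp y hy
    cases t with
    | nil =>
      simp only [List.mem_singleton] at hy
      simp [hy, hr]
    | cons b t' =>
      rw [List.getLast_cons (by simp)]
      rcases List.mem_cons.mp hy with h | h
      · subst h
        exact (List.pairwise_cons.mp hp).1 _ (List.getLast_mem _)
      · exact ih (by simp) (List.pairwise_cons.mp hp).2 y h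

theorem pv_pyGetD_zero_head (xs : List Char) (h : xs ≠ []) (dflt : Char) :
    PySem.List.pyGetD xs 0 dflt = xs.head h := by
  cases xs with
  | nil => exact absurd rfl h
  | cons c r => rw [PySem.List.pyGetD_zero_cons]; rfl

theorem pv_main (l : List (Int × Int)) (hpre : l ≠ []) :
    process_found_digits l = process_found_digits_alt l := by
  have hdne : pvAsDict l ≠ [] := pv_asDict_ne_nil hpre
  have hnd := pv_asDict_keys_nodup l
  have hinj : ∀ a ∈ pvAsDict l, ∀ b ∈ pvAsDict l, a.1 = b.1 → a = b :=
    fun a ha b hb h => List.inj_on_of_nodup_map hnd ha hb h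
  set d := pvAsDict l with hd
  set s := PySem.List.sorted d (fun p => p.1) with hs
  have hsne : s ≠ [] := by
    rw [hs, Ne, PySem.List.sorted_eq_nil_iff]; exact hdne
  obtain ⟨p, t, hst⟩ := List.exists_cons_of_ne_nil hsne
  set q := s.getLast hsne with hq
  have hmem_s_d : ∀ x, x ∈ s ↔ x ∈ d := fun x => PySem.List.mem_sorted d _ false x
  have hp_d : p ∈ d := (hmem_s_d p).mp (hst ▸ List.mem_cons_self ..)
  have hq_d : q ∈ d := (hmem_s_d q).mp (List.getLast_mem hsne)
  -- head is min, last is max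
  have hpmin : ∀ y ∈ d, p.1 ≤ y.1 := by
    apply PySem.List.key_head_sorted_le d (fun r => r.1) (t := t)
    rw [← hs]; exact hst
  have hqmax : ∀ y ∈ d, y.1 ≤ q.1 := by
    intro y hy
    exact pv_pairwise_getLast (fun a b => a.1 ≤ b.1) (fun a => le_refl _) s hsne
      (PySem.List.sorted_pairwise d _) y ((hmem_s_d y).mpr hy)
  -- min?/max? over the keys
  have hkeysne : d.map (fun p => p.1) ≠ [] := by simpa using hdne
  obtain ⟨mk, hmk⟩ : ∃ mk, PySem.List.min? (d.map (fun p => p.1)) (fun k => k) = some mk := by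
    cases h : PySem.List.min? (d.map (fun p => p.1)) (fun k => k) with
    | none => exact absurd ((PySem.List.min?_eq_none_iff _ _).mp h) hkeysne
    | some m => exact ⟨m, rfl⟩
  obtain ⟨xk, hxk⟩ : ∃ xk, PySem.List.max? (d.map (fun p => p.1)) (fun k => k) = some xk := by
    cases h : PySem.List.max? (d.map (fun p => p.1)) (fun k => k) with
    | none => exact absurd ((PySem.List.max?_eq_none_iff _ _).mp h) hkeysne
    | some m => exact ⟨m, rfl⟩
  have hmkp : mk = p.1 := by
    have h1 : mk ≤ p.1 := PySem.List.min?_isMin hmk p.1 (List.mem_map.mpr ⟨p, hp_d, rfl⟩)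
    obtain ⟨a, ha, hak⟩ := List.mem_map.mp (PySem.List.min?_mem hmk)
    exact le_antisymm h1 (hak ▸ hpmin a ha)
  have hxkq : xk = q.1 := by
    have h1 : q.1 ≤ xk := PySem.List.max?_isMax hxk q.1 (List.mem_map.mpr ⟨q, hq_d, rfl⟩)
    obtain ⟨a, ha, hak⟩ := List.mem_map.mp (PySem.List.max?_mem hxk)
    exact le_antisymm (hak ▸ hqmax a ha) h1
  have hfind1 : d.find? (fun r => r.1 == mk) = some p := by
    rw [hmkp]
    have := pv_find_nodup hnd (k := p.1) (v := p.2) (by simpa using hp_d)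
    simpa using this
  have hfind2 : d.find? (fun r => r.1 == xk) = some q := by
    rw [hxkq]
    have := pv_find_nodup hnd (k := q.1) (v := q.2) (by simpa using hq_d)
    simpa using this
  -- the joined string and its first/last characters
  unfold process_found_digits process_found_digits_alt
  dsimp only
  rw [show pvAsDict l = d from rfl]
  rw [pv_sorted2_eq_sorted d hinj, ← hs]
  set f : Int × Int → List Char := fun r => PySem.Int.toChars r.2 with hf
  set val : List Char := PySem.Chars.join [] (s.map (fun digit => PySem.Int.toChars digit.2)) with hval
  have hvalflat : val = (s.map f).flatten := by rw [hval, pv_join_nil]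
  have hvalne : val ≠ [] := by
    rw [hvalflat, hst]
    simp only [List.map_cons, List.flatten_cons]
    intro h
    exact pv_toChars_ne_nil p.2 (List.append_eq_nil_iff.mp h).1
  have hfp : f p ≠ [] := pv_toChars_ne_nil p.2
  have hfq : f q ≠ [] := pv_toChars_ne_nil q.2
  have hhead : val.head hvalne = (f p).head hfp := by
    apply Option.some.inj
    rw [← List.head?_eq_head, ← List.head?_eq_head, hvalflat, hst]
    simp only [List.map_cons, List.flatten_cons, List.head?_append]
    rw [List.head?_eq_head hfp]
    rfl
  have hlast : val.getLast hvalne = (f q).getLast hfq := by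
    apply Option.some.inj
    rw [← List.getLast?_eq_getLast, ← List.getLast?_eq_getLast, hvalflat]
    conv_lhs => rw [← List.dropLast_append_getLast hsne, ← hq]
    simp only [List.map_append, List.map_cons, List.map_nil, List.flatten_append,
      List.flatten_cons, List.flatten_nil, List.append_nil, List.getLast?_append]
    rw [List.getLast?_eq_getLast hfq]
    rfl
  -- reduce B's match and the lookups
  simp only [hmk, hxk, hfind1, hfind2, Option.map_some, Option.getD_some]
  -- reduce A's case analysis
  rw [pv_reshape val hvalne, hhead, hlast]
  -- B's two pyGetD's
  rw [show PySem.Int.toChars p.2 = f p from rfl, show PySem.Int.toChars q.2 = f q from rfl,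
    pv_pyGetD_zero_head (f p) hfp, PySem.List.pyGetD_neg_one (h := hfq)]

-- ===== VERDICT (by name: the statement is the Claim_ definition above) =====
theorem process_found_digits_spec : Claim_equal_process_found_digits := by
  intro l _ hpre
  unfold Spec_process_found_digits
  exact pv_main l hpre
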